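-- pv_equiv track=rewrite | github.com/gbhmayer/loteca2 | calculadora.py | gerar_fechamento_simples
-- ===== SOURCE A (Python) =====
-- def gerar_fechamento_simples(palpites_principais):
--     """
--     Transforma palpites com duplos e triplos em uma lista de cartões simples.
--     Exemplo: '1', '1X', '1X2' -> vira uma lista de strings para volantes individuais.
--     """
--     import itertools
--
--     # Converte strings como '1X' em listas ['1', 'X']
--     opcoes_por_jogo = []
--     for p in palpites_principais:
--         if p == '1X': opcoes_por_jogo.append(['1', 'X'])
--         elif p == 'X2': opcoes_por_jogo.append(['X', '2'])
--         elif p == '12': opcoes_por_jogo.append(['1', '2'])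
--         elif p == '1X2': opcoes_por_jogo.append(['1', 'X', '2'])
--         else: opcoes_por_jogo.append([p]) # Secos: '1', 'X' ou '2'
--
--     # Gera o produto cartesiano (todas as combinações possíveis)
--     combinacoes = list(itertools.product(*opcoes_por_jogo))
--     return combinacoes
-- ===== SOURCE B (Python) =====
-- _OPCOES = {'1X': ('1', 'X'), 'X2': ('X', '2'), '12': ('1', '2'), '1X2': ('1', 'X', '2')}
--
-- def gerar_fechamento_simples(palpites_principais):
--     # Right-to-left build with shared linked cells: walking the picks backwards,
--     # prefix each option (dict lookup) of the current game onto every shared tail;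
--     # then flatten each chain into a tuple once at the end.
--     tails = [None]
--     for p in reversed(palpites_principais):
--         opts = _OPCOES.get(p, (p,))
--         tails = [(x, t) for x in opts for t in tails]
--     out = []
--     for t in tails:
--         card = []
--         while t is not None:
--             card.append(t[0])
--             t = t[1]
--         out.append(tuple(card))
--     return out
-- ===== Notes on version B (the rewrite author's own statement) =====
-- stated objective: alternative
-- what changed: Replaces the parse-then-itertools.product pipeline (if/elif chain building option lists, then one product call) with a right-to-left iterative build over shared linked cells: walking the picks backwards, each option (dict lookup) is prefixed onto every shared tail, and each chain is flattened into a tuple once at the end.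
import Mathlib
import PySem

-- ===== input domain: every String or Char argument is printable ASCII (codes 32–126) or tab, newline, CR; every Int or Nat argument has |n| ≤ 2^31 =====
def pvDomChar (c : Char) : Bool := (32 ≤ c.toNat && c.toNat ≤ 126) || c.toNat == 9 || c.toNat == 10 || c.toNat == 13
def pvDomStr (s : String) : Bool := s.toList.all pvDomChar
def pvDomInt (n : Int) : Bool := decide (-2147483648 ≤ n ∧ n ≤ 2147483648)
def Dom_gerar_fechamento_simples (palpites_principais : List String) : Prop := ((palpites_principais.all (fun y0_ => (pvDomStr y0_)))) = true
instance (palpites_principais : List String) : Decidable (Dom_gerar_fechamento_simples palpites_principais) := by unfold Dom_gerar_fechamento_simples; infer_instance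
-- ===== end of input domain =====

-- B replaces the parse-then-itertools.product pipeline with a single recursive right-to-left build (alternative decomposition, same cost).


-- ===== PORT A =====
-- option list for one pick (A's if/elif chain)
def pvOptsA (p : String) : List String :=
  if p = "1X" then ["1", "X"]
  else if p = "X2" then ["X", "2"]
  else if p = "12" then ["1", "2"]
  else if p = "1X2" then ["1", "X", "2"]
  else [p]

-- itertools.product(*pools): result = [[]]; for pool in pools: result = [r+[x] for r in result for x in pool]
def pvProduct (pools : List (List String)) : List (List String) :=
  pools.foldl (fun result pool => result.flatMap (fun r => pool.map (fun x => r ++ [x]))) [[]]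

def gerar_fechamento_simples (palpites_principais : List String) : List (List String) :=
  let opcoes_por_jogo :=
    palpites_principais.foldl (fun acc p => acc ++ [pvOptsA p]) []
  pvProduct opcoes_por_jogo

-- ===== PORT B =====
def pvOpcoesDict : PySem.Dict String (List String) :=
  PySem.Dict.mk [("1X", ["1", "X"]), ("X2", ["X", "2"]), ("12", ["1", "2"]), ("1X2", ["1", "X", "2"])]

-- a Python cell: None | (head, tail)
inductive pvCell : Type
  | nil : pvCell
  | cons : String → pvCell → pvCell
deriving DecidableEq, Repr

-- the final while loop: unfold one chain front to back
def pvCellToList : pvCell → List String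
  | pvCell.nil => []
  | pvCell.cons x t => x :: pvCellToList t

-- tails = [None]; for p in reversed(palpites): tails = [(x, t) for x in opts for t in tails]; then flatten each chain
def gerar_fechamento_simples_alt (palpites_principais : List String) : List (List String) :=
  let tails :=
    palpites_principais.reverse.foldl
      (fun tails p =>
        (PySem.Dict.getD pvOpcoesDict p [p]).flatMap (fun x => tails.map (pvCell.cons x)))
      [pvCell.nil]
  tails.map pvCellToList

-- ===== PRECONDITION & SPEC =====
def Spec_gerar_fechamento_simples (palpites_principais : List String) (out : List (List String)) : Prop := out = gerar_fechamento_simples_alt palpites_principais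
instance (palpites_principais : List String) (out : List (List String)) : Decidable (Spec_gerar_fechamento_simples palpites_principais out) := by unfold Spec_gerar_fechamento_simples; infer_instance

-- ===== CLAIM (what is proved, stated in full; the proofs are below) =====
def Claim_equal_gerar_fechamento_simples : Prop := ∀ (palpites_principais : List String), Dom_gerar_fechamento_simples palpites_principais → Spec_gerar_fechamento_simples palpites_principais (gerar_fechamento_simples palpites_principais)

-- ===== LEMMAS AND PROOFS =====

-- proof helper: the right fold B's backwards loop computes, in recursive form
def pvCombos : List String → List (List String)
  | [] => [[]]
  | p :: rest =>
      let tails := pvCombos rest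
      (PySem.Dict.getD pvOpcoesDict p [p]).flatMap (fun x => tails.map (fun t => x :: t))

theorem pvAlt_eq_combos (l : List String) :
    gerar_fechamento_simples_alt l = pvCombos l := by
  unfold gerar_fechamento_simples_alt
  rw [List.foldl_reverse]
  induction l with
  | nil => rfl
  | cons p rest ih =>
      simp only [List.foldr_cons, List.map_flatMap, List.map_map] at *
      simp [pvCombos, ← ih, Function.comp_def, pvCellToList]


theorem pvOpts_eq (p : String) : pvOptsA p = PySem.Dict.getD pvOpcoesDict p [p] := by
  unfold pvOptsA pvOpcoesDict
  split_ifs with h1 h2 h3 h4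
  · subst h1; decide
  · subst h2; decide
  · subst h3; decide
  · subst h4; decide
  · simp [PySem.Dict.getD, PySem.Dict.get?, Ne.symm h1, Ne.symm h2, Ne.symm h3, Ne.symm h4]

theorem pvProduct_step (pools : List (List String)) (acc : List (List String)) :
    pools.foldl (fun result pool => result.flatMap (fun r => pool.map (fun x => r ++ [x]))) acc
      = acc.flatMap (fun r => (pvProduct pools).map (fun t => r ++ t)) := by
  induction pools generalizing acc with
  | nil => simp [pvProduct]
  | cons pool rest ih =>
      rw [List.foldl_cons, ih]
      have hstep : pvProduct (pool :: rest)
          = List.flatMap (fun r => (pvProduct rest).map (fun t => r ++ t))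
              (List.flatMap (fun r => pool.map (fun x => r ++ [x])) [[]]) := by
        show List.foldl _ [[]] (pool :: rest) = _
        rw [List.foldl_cons, ih]
      rw [hstep]
      simp [List.flatMap_assoc, List.flatMap_map, List.map_flatMap, List.map_map,
        Function.comp_def, List.append_assoc]

theorem pvProduct_eq_combos (l : List String) :
    pvProduct (l.map pvOptsA) = pvCombos l := by
  induction l with
  | nil => simp [pvProduct, pvCombos]
  | cons p rest ih =>
      simp only [List.map_cons, pvProduct, List.foldl_cons]
      rw [pvProduct_step]
      simp [pvCombos, ← ih, pvOpts_eq, List.flatMap_map]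

-- ===== VERDICT (by name: the statement is the Claim_ definition above) =====
theorem gerar_fechamento_simples_spec : Claim_equal_gerar_fechamento_simples := by
  intro l _
  unfold Spec_gerar_fechamento_simples gerar_fechamento_simples
  rw [PySem.List.foldl_append_singleton_eq_map pvOptsA l [], List.nil_append,
    pvAlt_eq_combos]
  exact pvProduct_eq_combos l
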